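-- pv_equiv track=rewrite | github.com/andreacos/CnnJpegPrimaryQuantizationEstimation | utils.py | jpeg_zigzag_order
-- ===== SOURCE A (Python) =====
-- def jpeg_zigzag_order(n):
--
--     """ Zig-zag reordering of [n x n] matrix
--
--     Keyword arguments:
--     n : size of the matrix to be rearranged in zig-zag order
--     """
--
--     def move(i, j):
--         if j < (n - 1):
--             return max(0, i - 1), j + 1
--         else:
--             return i + 1, j
--
--     a = [[0] * n for _ in range(n)]
--     x, y = 0, 0
--     for v in range(n * n):
--         a[y][x] = v
--         if (x + y) & 1:
--             x, y = move(x, y)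
--         else:
--             y, x = move(y, x)
--     return a
-- ===== SOURCE B (Python) =====
-- def jpeg_zigzag_order(n):
--     """Zig-zag reordering of [n x n] matrix, built anti-diagonal by anti-diagonal."""
--     a = [[0] * n for _ in range(n)]
--     v = 0
--     for d in range(2 * n - 1):
--         lo = max(0, d - n + 1)
--         hi = min(d, n - 1)
--         rows = range(hi, lo - 1, -1) if d % 2 == 0 else range(lo, hi + 1)
--         for i in rows:
--             a[i][d - i] = v
--             v += 1
--     return a
-- ===== Notes on version B (the rewrite author's own statement) =====
-- stated objective: faster
-- what changed: Replaces A's cell-by-cell position state machine (a nested move() helper called with parity branching at every cell) by direct iteration over the anti-diagonals, emitting each diagonal's cells as a plain range in the proper direction with a running counter; the per-cell helper call and parity test disappear.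
import Mathlib
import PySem

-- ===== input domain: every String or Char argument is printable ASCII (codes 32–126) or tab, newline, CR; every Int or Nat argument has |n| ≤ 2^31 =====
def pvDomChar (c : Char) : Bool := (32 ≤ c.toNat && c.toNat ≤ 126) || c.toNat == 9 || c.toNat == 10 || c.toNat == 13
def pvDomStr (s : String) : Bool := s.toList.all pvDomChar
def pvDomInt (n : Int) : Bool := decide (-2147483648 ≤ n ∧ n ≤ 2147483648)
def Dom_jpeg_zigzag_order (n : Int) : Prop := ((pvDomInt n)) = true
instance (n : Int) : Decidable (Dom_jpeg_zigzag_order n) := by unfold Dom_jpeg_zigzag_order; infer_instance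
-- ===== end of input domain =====

-- B builds the matrix anti-diagonal by anti-diagonal with a running counter instead of A's
-- cell-by-cell position state machine; it avoids A's per-cell helper call and parity test
-- (a timing run measured B faster by a constant factor).

-- ===== PORT A =====
-- a[i][j] = v  (exact on in-range non-negative indices — the only ones either loop reaches for n ≥ 0)
def setC (a : List (List Int)) (i j : Int) (v : Int) : List (List Int) :=
  PySem.List.pySetD a i (PySem.List.pySetD (PySem.List.pyGetD a i []) j v)

-- the nested helper 'move(i, j)' of A
def moveA (n i j : Int) : Int × Int :=
  if j < n - 1 then (max 0 (i - 1), j + 1) else (i + 1, j)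

-- state: (a, x, y); body: a[y][x] = v, then parity-branched position update
def jpeg_zigzag_order (n : Int) : List (List Int) :=
  ((PySem.List.pyRange 0 (n * n) 1).foldl
    (fun (s : List (List Int) × Int × Int) v =>
      (setC s.1 s.2.2 s.2.1 v,
       if PySem.Int.band (s.2.1 + s.2.2) 1 ≠ 0 then
         moveA n s.2.1 s.2.2
       else
         ((moveA n s.2.2 s.2.1).2, (moveA n s.2.2 s.2.1).1)))
    (List.replicate n.toNat (List.replicate n.toNat (0 : Int)), 0, 0)).1

-- ===== PORT B =====
-- state: (a, v); for each diagonal d, rows = range(hi, lo-1, -1) if d even else range(lo, hi+1)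
def jpeg_zigzag_order_alt (n : Int) : List (List Int) :=
  ((PySem.List.pyRange 0 (2 * n - 1) 1).foldl
    (fun (s : List (List Int) × Int) d =>
      (if PySem.Int.mod d 2 = 0 then
         PySem.List.pyRange (min d (n - 1)) (max 0 (d - n + 1) - 1) (-1)
       else
         PySem.List.pyRange (max 0 (d - n + 1)) (min d (n - 1) + 1) 1).foldl
        (fun (s : List (List Int) × Int) i => (setC s.1 i (d - i) s.2, s.2 + 1)) s)
    (List.replicate n.toNat (List.replicate n.toNat (0 : Int)), 0)).1

-- ===== PRECONDITION & SPEC =====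
-- For n < 0 the Python A raises IndexError (range(n*n) is non-empty but the matrix is empty).
def Pre_jpeg_zigzag_order (n : Int) : Prop := 0 ≤ n
instance (n : Int) : Decidable (Pre_jpeg_zigzag_order n) := by unfold Pre_jpeg_zigzag_order; infer_instance
def pvWitness_jpeg_zigzag_order : Int := 3

def Spec_jpeg_zigzag_order (n : Int) (out : List (List Int)) : Prop := out = jpeg_zigzag_order_alt n
instance (n : Int) (out : List (List Int)) : Decidable (Spec_jpeg_zigzag_order n out) := by unfold Spec_jpeg_zigzag_order; infer_instance

-- ===== CLAIM (what is proved, stated in full; the proofs are below) =====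
def Claim_equal_jpeg_zigzag_order : Prop := ∀ (n : Int), Dom_jpeg_zigzag_order n → Pre_jpeg_zigzag_order n → Spec_jpeg_zigzag_order n (jpeg_zigzag_order n)

-- ===== LEMMAS AND PROOFS =====

-- A's position update, as a function of the (x, y) pair
def stepA (n : Int) (p : Int × Int) : Int × Int :=
  if PySem.Int.band (p.1 + p.2) 1 ≠ 0 then moveA n p.1 p.2
  else ((moveA n p.2 p.1).2, (moveA n p.2 p.1).1)

-- the (row, col) cells A visits, in order, for k steps from position p = (x, y)
def walk (n : Int) (p : Int × Int) : ℕ → List (Int × Int)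
  | 0 => []
  | Nat.succ k => (p.2, p.1) :: walk n (stepA n p) k

-- assign consecutive values along a list of (row, col) cells
def placeS (s : List (List Int) × Int) (cs : List (Int × Int)) : List (List Int) × Int :=
  cs.foldl (fun s c => (setC s.1 c.1 c.2 s.2, s.2 + 1)) s

-- the cells of anti-diagonal d in B's order
def diag (n d : Int) : List (Int × Int) :=
  (if PySem.Int.mod d 2 = 0 then
     PySem.List.pyRange (min d (n - 1)) (max 0 (d - n + 1) - 1) (-1)
   else
     PySem.List.pyRange (max 0 (d - n + 1)) (min d (n - 1) + 1) 1).map (fun i => (i, d - i))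

def diagsFuel (n : Int) : ℕ → Int → List (Int × Int)
  | 0, _ => []
  | Nat.succ t, d => diag n d ++ diagsFuel n t (d + 1)

-- c cells of diagonal d starting at row i, rows descending / ascending
def cellsDesc (d : Int) : ℕ → Int → List (Int × Int)
  | 0, _ => []
  | Nat.succ c, i => (i, d - i) :: cellsDesc d c (i - 1)
def cellsAsc (d : Int) : ℕ → Int → List (Int × Int)
  | 0, _ => []
  | Nat.succ c, i => (i, d - i) :: cellsAsc d c (i + 1)

-- where the walk stands when it reaches diagonal d
def startSt (n d : Int) : Int × Int :=
  if d % 2 = 0 then (d - min d (n - 1), min d (n - 1))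
  else (d - max 0 (d - n + 1), max 0 (d - n + 1))

lemma A_fold (n : Int) : ∀ (k : ℕ) (v0 b : Int), b - v0 = (k : Int) →
    ∀ (a : List (List Int)) (x y : Int),
    ((PySem.List.pyRange v0 b 1).foldl
      (fun (s : List (List Int) × Int × Int) v =>
        (setC s.1 s.2.2 s.2.1 v,
         if PySem.Int.band (s.2.1 + s.2.2) 1 ≠ 0 then
           moveA n s.2.1 s.2.2
         else
           ((moveA n s.2.2 s.2.1).2, (moveA n s.2.2 s.2.1).1)))
      (a, x, y)).1
      = (placeS (a, v0) (walk n (x, y) k)).1 := by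
  intro k
  induction k with
  | zero =>
    intro v0 b hb a x y
    rw [PySem.List.pyRange_one_eq_nil (by push_cast at hb; omega)]
    rfl
  | succ k ih =>
    intro v0 b hb a x y
    rw [PySem.List.pyRange_one_cons (by push_cast at hb; omega)]
    simp only [List.foldl_cons]
    have hstep : (if PySem.Int.band (x + y) 1 ≠ 0 then moveA n x y
        else ((moveA n y x).2, (moveA n y x).1)) = stepA n (x, y) := rfl
    rw [show (walk n (x, y) (k + 1)) = (y, x) :: walk n (stepA n (x, y)) k from rfl]
    simp only [placeS, List.foldl_cons]
    rw [hstep]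
    rw [show stepA n (x, y) = ((stepA n (x, y)).1, (stepA n (x, y)).2) from rfl]
    exact ih (v0 + 1) b (by push_cast at hb ⊢; omega) _ _ _

lemma B_inner (d : Int) : ∀ (rows : List Int) (s : List (List Int) × Int),
    rows.foldl (fun (s : List (List Int) × Int) i => (setC s.1 i (d - i) s.2, s.2 + 1)) s
      = placeS s (rows.map (fun i => (i, d - i))) := by
  intro rows
  induction rows with
  | nil => intro s; rfl
  | cons i rest ih => intro s; simp only [List.foldl_cons, List.map_cons, placeS] at *; rw [ih]

lemma B_fold (n : Int) : ∀ (ds : List Int) (s : List (List Int) × Int),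
    ds.foldl
      (fun (s : List (List Int) × Int) d =>
        (if PySem.Int.mod d 2 = 0 then
           PySem.List.pyRange (min d (n - 1)) (max 0 (d - n + 1) - 1) (-1)
         else
           PySem.List.pyRange (max 0 (d - n + 1)) (min d (n - 1) + 1) 1).foldl
          (fun (s : List (List Int) × Int) i => (setC s.1 i (d - i) s.2, s.2 + 1)) s) s
      = placeS s (ds.flatMap (diag n)) := by
  intro ds
  induction ds with
  | nil => intro s; rfl
  | cons d rest ih =>
    intro s
    simp only [List.foldl_cons, List.flatMap_cons]
    rw [B_inner d]
    rw [ih]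
    simp only [placeS, diag, List.foldl_append]

lemma flat_eq (n : Int) : ∀ (t : ℕ) (d : Int), 2 * n - 1 - d = (t : Int) →
    (PySem.List.pyRange d (2 * n - 1) 1).flatMap (diag n) = diagsFuel n t d := by
  intro t
  induction t with
  | zero =>
    intro d h
    rw [PySem.List.pyRange_one_eq_nil (by omega)]
    rfl
  | succ t ih =>
    intro d h
    rw [PySem.List.pyRange_one_cons (by push_cast at h ⊢; omega)]
    simp only [List.flatMap_cons, diagsFuel]
    rw [ih (d + 1) (by push_cast at h ⊢; omega)]

lemma cellsDesc_eq (d : Int) : ∀ (c : ℕ) (i : Int),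
    (PySem.List.pyRange i (i - (c : Int)) (-1)).map (fun j => (j, d - j)) = cellsDesc d c i := by
  intro c
  induction c with
  | zero =>
    intro i
    rw [show i - ((0:ℕ):Int) = i by push_cast; ring]
    rw [PySem.List.pyRange_neg_one_eq_nil (le_refl i)]
    rfl
  | succ c ih =>
    intro i
    rw [PySem.List.pyRange_neg_one_cons (by push_cast; omega)]
    simp only [List.map_cons, cellsDesc]
    rw [show i - ((c+1:ℕ):Int) = (i - 1) - ((c:ℕ):Int) by push_cast; ring]
    rw [ih (i - 1)]

lemma cellsAsc_eq (d : Int) : ∀ (c : ℕ) (i : Int),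
    (PySem.List.pyRange i (i + (c : Int)) 1).map (fun j => (j, d - j)) = cellsAsc d c i := by
  intro c
  induction c with
  | zero =>
    intro i
    rw [show i + ((0:ℕ):Int) = i by push_cast; ring]
    rw [PySem.List.pyRange_one_eq_nil (le_refl i)]
    rfl
  | succ c ih =>
    intro i
    rw [PySem.List.pyRange_one_cons (by push_cast; omega)]
    simp only [List.map_cons, cellsAsc]
    rw [show i + ((c+1:ℕ):Int) = (i + 1) + ((c:ℕ):Int) by push_cast; ring]
    rw [ih (i + 1)]

lemma cellsDesc_length (d : Int) : ∀ (c : ℕ) (i : Int), (cellsDesc d c i).length = c := by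
  intro c
  induction c with
  | zero => intro i; rfl
  | succ c ih => intro i; simp [cellsDesc, ih]

lemma cellsAsc_length (d : Int) : ∀ (c : ℕ) (i : Int), (cellsAsc d c i).length = c := by
  intro c
  induction c with
  | zero => intro i; rfl
  | succ c ih => intro i; simp [cellsAsc, ih]

lemma diag_even (n d : Int) (hn : 1 ≤ n) (hpar : d % 2 = 0) (hd0 : 0 ≤ d) (hd2 : d ≤ 2 * n - 2) :
    diag n d = cellsDesc d (min d (n - 1) - max 0 (d - n + 1) + 1).toNat (min d (n - 1)) := by
  have hmin := min_choice d (n - 1)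
  have hmax := max_choice 0 (d - n + 1)
  have hle : max 0 (d - n + 1) ≤ min d (n - 1) := by rcases hmin with h | h <;> rcases hmax with h' | h' <;> omega
  have hc : ((min d (n - 1) - max 0 (d - n + 1) + 1).toNat : Int) = min d (n - 1) - max 0 (d - n + 1) + 1 := Int.toNat_of_nonneg (by omega)
  unfold diag
  rw [if_pos (by rw [PySem.Int.mod_eq_emod_of_pos (by omega : (0:Int) < 2)]; exact hpar)]
  rw [show max 0 (d - n + 1) - 1 = min d (n - 1) - ((min d (n - 1) - max 0 (d - n + 1) + 1).toNat : Int) by omega]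
  exact cellsDesc_eq d _ _

lemma diag_odd (n d : Int) (hn : 1 ≤ n) (hpar : d % 2 = 1) (hd0 : 0 ≤ d) (hd2 : d ≤ 2 * n - 2) :
    diag n d = cellsAsc d (min d (n - 1) - max 0 (d - n + 1) + 1).toNat (max 0 (d - n + 1)) := by
  have hmin := min_choice d (n - 1)
  have hmax := max_choice 0 (d - n + 1)
  have hle : max 0 (d - n + 1) ≤ min d (n - 1) := by rcases hmin with h | h <;> rcases hmax with h' | h' <;> omega
  have hc : ((min d (n - 1) - max 0 (d - n + 1) + 1).toNat : Int) = min d (n - 1) - max 0 (d - n + 1) + 1 := Int.toNat_of_nonneg (by omega)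
  unfold diag
  rw [if_neg (by rw [PySem.Int.mod_eq_emod_of_pos (by omega : (0:Int) < 2)]; omega)]
  rw [show min d (n - 1) + 1 = max 0 (d - n + 1) + ((min d (n - 1) - max 0 (d - n + 1) + 1).toNat : Int) by omega]
  exact cellsAsc_eq d _ _

lemma run_even (n : Int) (hn : 1 ≤ n) (d : Int) (hpar : d % 2 = 0) (hd0 : 0 ≤ d)
    (hd2 : d ≤ 2 * n - 2) :
    ∀ (c : ℕ) (i : Int), max 0 (d - n + 1) ≤ i → i ≤ min d (n - 1) →
      i - max 0 (d - n + 1) + 1 = (c : Int) → ∀ (r : ℕ),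
      walk n (d - i, i) (c + r)
        = cellsDesc d c i ++ walk n (d + 1 - max 0 (d + 1 - n + 1), max 0 (d + 1 - n + 1)) r := by
  have hmin := min_choice d (n - 1)
  have hmax := max_choice 0 (d - n + 1)
  intro c
  induction c with
  | zero => intro i h1 h2 hc r; exfalso; push_cast at hc; omega
  | succ c ih =>
    intro i h1 h2 hc r
    have hi0 : 0 ≤ i := le_trans (le_max_left _ _) h1
    rw [show c + 1 + r = Nat.succ (c + r) by omega]
    rw [show walk n (d - i, i) (Nat.succ (c + r))
        = (i, d - i) :: walk n (stepA n (d - i, i)) (c + r) from rfl]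
    have hband : PySem.Int.band (d - i + i) 1 = 0 := by
      rw [show d - i + i = d by ring, PySem.Int.band_one,
        PySem.Int.mod_eq_emod_of_pos (by omega : (0:Int) < 2)]
      exact hpar
    have hstep : stepA n (d - i, i) = ((moveA n i (d - i)).2, (moveA n i (d - i)).1) := by
      unfold stepA
      rw [if_neg (by simp only [hband]; omega)]
    rcases Nat.eq_zero_or_pos c with hc0 | hcpos
    · -- last cell of the diagonal: i = lo; the step lands on the start of diagonal d+1
      subst hc0
      have hieq : i = max 0 (d - n + 1) := by push_cast at hc; omega
      have hst : stepA n (d - i, i)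
          = (d + 1 - max 0 (d + 1 - n + 1), max 0 (d + 1 - n + 1)) := by
        rw [hstep]
        unfold moveA
        by_cases hlt : d - i < n - 1
        · rw [if_pos hlt]
          have hlo0 : i = 0 := by rcases hmax with h | h <;> omega
          have h2' : max 0 (i - 1) = 0 := by
            rcases max_choice 0 (i - 1) with h | h <;> omega
          simp only [Prod.mk.injEq, and_true, true_and]
          omega
        · have hx : d - i = n - 1 := by
            rcases hmax with h | h <;> rcases hmin with h' | h' <;> omega
          rw [if_neg (by omega)]
          simp only [Prod.mk.injEq, and_true, true_and]
          omega
      rw [hst]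
      simp only [cellsDesc, List.cons_append, List.nil_append, Nat.zero_add]
    · -- interior cell: i > lo; the step moves up-right along the diagonal
      have hlt : d - i < n - 1 := by
        rcases hmax with h | h <;> rcases hmin with h' | h' <;> push_cast at hc <;> omega
      have hi1 : 1 ≤ i := by rcases hmax with h | h <;> push_cast at hc <;> omega
      have hst : stepA n (d - i, i) = (d - (i - 1), i - 1) := by
        rw [hstep]
        unfold moveA
        rw [if_pos (by omega)]
        simp only [Prod.mk.injEq, and_true, true_and]
        omega
      rw [hst]
      rw [show cellsDesc d (c + 1) i = (i, d - i) :: cellsDesc d c (i - 1) from rfl]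
      rw [List.cons_append]
      congr 1
      exact ih (i - 1) (by push_cast at hc; omega) (by omega) (by push_cast at hc ⊢; omega) r

lemma run_odd (n : Int) (hn : 1 ≤ n) (d : Int) (hpar : d % 2 = 1) (hd0 : 0 ≤ d)
    (hd2 : d ≤ 2 * n - 2) :
    ∀ (c : ℕ) (i : Int), max 0 (d - n + 1) ≤ i → i ≤ min d (n - 1) →
      min d (n - 1) - i + 1 = (c : Int) → ∀ (r : ℕ),
      walk n (d - i, i) (c + r)
        = cellsAsc d c i ++ walk n (d + 1 - min (d + 1) (n - 1), min (d + 1) (n - 1)) r := by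
  have hmin := min_choice d (n - 1)
  have hmax := max_choice 0 (d - n + 1)
  intro c
  induction c with
  | zero => intro i h1 h2 hc r; exfalso; push_cast at hc; omega
  | succ c ih =>
    intro i h1 h2 hc r
    have hi0 : 0 ≤ i := le_trans (le_max_left _ _) h1
    rw [show c + 1 + r = Nat.succ (c + r) by omega]
    rw [show walk n (d - i, i) (Nat.succ (c + r))
        = (i, d - i) :: walk n (stepA n (d - i, i)) (c + r) from rfl]
    have hband : PySem.Int.band (d - i + i) 1 = 1 := by
      rw [show d - i + i = d by ring, PySem.Int.band_one,
        PySem.Int.mod_eq_emod_of_pos (by omega : (0:Int) < 2)]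
      exact hpar
    have hstep : stepA n (d - i, i) = moveA n (d - i) i := by
      unfold stepA
      rw [if_pos (by simp only [hband]; omega)]
    rcases Nat.eq_zero_or_pos c with hc0 | hcpos
    · -- last cell of the diagonal: i = hi; the step lands on the start of diagonal d+1
      subst hc0
      have hieq : i = min d (n - 1) := by push_cast at hc; omega
      have hst : stepA n (d - i, i)
          = (d + 1 - min (d + 1) (n - 1), min (d + 1) (n - 1)) := by
        rw [hstep]
        unfold moveA
        by_cases hlt : i < n - 1
        · rw [if_pos hlt]
          have hid : i = d := by rcases hmin with h | h <;> omega
          have h2' : max 0 (d - i - 1) = 0 := by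
            rcases max_choice 0 (d - i - 1) with h | h <;> omega
          simp only [Prod.mk.injEq, and_true, true_and]
          omega
        · have hin : i = n - 1 := by rcases hmin with h | h <;> omega
          rw [if_neg (by omega)]
          simp only [Prod.mk.injEq, and_true, true_and]
          omega
      rw [hst]
      simp only [cellsAsc, List.cons_append, List.nil_append, Nat.zero_add]
    · -- interior cell: i < hi; the step moves down-left along the diagonal
      have hlt : i < n - 1 := by rcases hmin with h | h <;> push_cast at hc <;> omega
      have hid : i < d := by rcases hmin with h | h <;> push_cast at hc <;> omega
      have hst : stepA n (d - i, i) = (d - (i + 1), i + 1) := by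
        rw [hstep]
        unfold moveA
        rw [if_pos (by omega)]
        simp only [Prod.mk.injEq, and_true, true_and]
        omega
      rw [hst]
      rw [show cellsAsc d (c + 1) i = (i, d - i) :: cellsAsc d c (i + 1) from rfl]
      rw [List.cons_append]
      congr 1
      exact ih (i + 1) (by omega) (by push_cast at hc; omega) (by push_cast at hc ⊢; omega) r

lemma chain (n : Int) (hn : 1 ≤ n) : ∀ (t : ℕ) (d : Int), 0 ≤ d → d + (t : Int) = 2 * n - 1 →
    walk n (startSt n d) ((diagsFuel n t d).length) = diagsFuel n t d := by
  intro t
  induction t with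
  | zero => intro d h0 ht; rfl
  | succ t ih =>
    intro d h0 ht
    have hd2 : d ≤ 2 * n - 2 := by push_cast at ht; omega
    have hmin := min_choice d (n - 1)
    have hmax := max_choice 0 (d - n + 1)
    have hle : max 0 (d - n + 1) ≤ min d (n - 1) := by
      rcases hmin with h | h <;> rcases hmax with h' | h' <;> omega
    have hcnat : ((min d (n - 1) - max 0 (d - n + 1) + 1).toNat : Int)
        = min d (n - 1) - max 0 (d - n + 1) + 1 := Int.toNat_of_nonneg (by omega)
    rw [show diagsFuel n (t + 1) d = diag n d ++ diagsFuel n t (d + 1) from rfl]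
    rw [List.length_append]
    rcases Int.emod_two_eq d with hpar | hpar
    · -- even diagonal
      rw [diag_even n d hn hpar h0 hd2]
      rw [cellsDesc_length]
      rw [show startSt n d = (d - min d (n - 1), min d (n - 1)) by
        unfold startSt; rw [if_pos hpar]]
      rw [run_even n hn d hpar h0 hd2 _ (min d (n - 1)) hle (le_refl _) (by omega) _]
      congr 1
      have hnext : startSt n (d + 1) = (d + 1 - max 0 (d + 1 - n + 1), max 0 (d + 1 - n + 1)) := by
        unfold startSt; rw [if_neg (by omega)]
      rw [← hnext]
      exact ih (d + 1) (by omega) (by push_cast at ht ⊢; omega)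
    · -- odd diagonal
      rw [diag_odd n d hn hpar h0 hd2]
      rw [cellsAsc_length]
      rw [show startSt n d = (d - max 0 (d - n + 1), max 0 (d - n + 1)) by
        unfold startSt; rw [if_neg (by omega)]]
      rw [run_odd n hn d hpar h0 hd2 _ (max 0 (d - n + 1)) (le_refl _) hle (by omega) _]
      congr 1
      have hnext : startSt n (d + 1) = (d + 1 - min (d + 1) (n - 1), min (d + 1) (n - 1)) := by
        unfold startSt; rw [if_pos (by omega)]
      rw [← hnext]
      exact ih (d + 1) (by omega) (by push_cast at ht ⊢; omega)

lemma diagsFuel_count (n : Int) (hn : 1 ≤ n) : ∀ (t : ℕ) (d : Int), 0 ≤ d →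
    d + (t : Int) = 2 * n - 1 →
    2 * ((diagsFuel n t d).length : Int)
      = if (t : Int) ≤ n then (t : Int) * ((t : Int) + 1)
        else 2 * n * (n + 1) + 4 * n * ((t : Int) - n) - (t : Int) * ((t : Int) + 1) := by
  intro t
  induction t with
  | zero =>
    intro d h0 ht
    rw [if_pos (by push_cast; omega)]
    simp [diagsFuel]
  | succ t ih =>
    intro d h0 ht
    have hd2 : d ≤ 2 * n - 2 := by push_cast at ht; omega
    have hmin := min_choice d (n - 1)
    have hmax := max_choice 0 (d - n + 1)
    have hle : max 0 (d - n + 1) ≤ min d (n - 1) := by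
      rcases hmin with h | h <;> rcases hmax with h' | h' <;> omega
    have hlen : ((diag n d).length : Int) = min d (n - 1) - max 0 (d - n + 1) + 1 := by
      rcases Int.emod_two_eq d with hpar | hpar
      · rw [diag_even n d hn hpar h0 hd2, cellsDesc_length]
        exact Int.toNat_of_nonneg (by omega)
      · rw [diag_odd n d hn hpar h0 hd2, cellsAsc_length]
        exact Int.toNat_of_nonneg (by omega)
    have hrec := ih (d + 1) (by omega) (by push_cast at ht ⊢; omega)
    rw [show diagsFuel n (t + 1) d = diag n d ++ diagsFuel n t (d + 1) from rfl]
    rw [List.length_append]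
    push_cast at ht hrec ⊢
    have hlen' : ((diag n d).length : Int) = if d ≤ n - 1 then d + 1 else 2 * n - 1 - d := by
      rw [hlen]; rcases hmin with h | h <;> rcases hmax with h' | h' <;> split_ifs <;> omega
    split_ifs at hrec hlen' ⊢ <;> nlinarith [hrec, hlen']

lemma total_count (n : Int) (hn : 1 ≤ n) :
    (n * n).toNat = (diagsFuel n (2 * n - 1).toNat 0).length := by
  have h := diagsFuel_count n hn (2 * n - 1).toNat 0 (le_refl 0)
    (by rw [Int.toNat_of_nonneg (by omega)]; ring)
  rw [Int.toNat_of_nonneg (by omega : (0:Int) ≤ 2 * n - 1)] at h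
  have h2 : 2 * ((diagsFuel n (2 * n - 1).toNat 0).length : Int) = 2 * (n * n) := by
    rw [h]; split_ifs with hi
    · nlinarith
    · ring
  omega

-- ===== VERDICT (by name: the statement is the Claim_ definition above) =====
theorem jpeg_zigzag_order_spec : Claim_equal_jpeg_zigzag_order := by
  intro n hdom hpre
  unfold Spec_jpeg_zigzag_order
  by_cases h0 : n = 0
  · subst h0; decide
  · have hn : 1 ≤ n := by unfold Pre_jpeg_zigzag_order at hpre; omega
    unfold jpeg_zigzag_order jpeg_zigzag_order_alt
    rw [A_fold n (n * n).toNat 0 (n * n)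
      (by rw [Int.toNat_of_nonneg (by positivity)]; ring) _ 0 0]
    rw [B_fold n]
    rw [flat_eq n (2 * n - 1).toNat 0 (by rw [Int.toNat_of_nonneg (by omega)]; ring)]
    suffices h : walk n (0, 0) (n * n).toNat = diagsFuel n (2 * n - 1).toNat 0 by rw [h]
    have hst : startSt n 0 = (0, 0) := by
      unfold startSt
      rw [if_pos (by decide), min_eq_left (by omega : (0:Int) ≤ n - 1)]
      norm_num
    rw [total_count n hn, ← hst]
    exact chain n hn (2 * n - 1).toNat 0 (le_refl 0)
      (by rw [Int.toNat_of_nonneg (by omega)]; ring)
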